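-- pv_equiv track=rewrite | github.com/GuardianNinja/advanced-language-translator | translator.py | apply_context
-- ===== SOURCE A (Python) =====
-- glyph_map = {
--     "spiral": "fly",
--     "triangle_eye": "see",
--     "dot_cluster": "spirit",
--     "arc_wave": "flow",
--     "heart": "love",
--     "mandala": "balance",
--     "tear": "weep"
-- }
--
-- def apply_context(tokens):
--     result = []
--     for i, tok in enumerate(tokens):
--         if tok == "spiral" and i+1 < len(tokens) and tokens[i+1] == "spiral":
--             result.append("fly fast")
--         else:
--             result.append(glyph_map.get(tok, f"[unknown:{tok}]"))
--     return result
-- ===== SOURCE B (Python) =====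
-- glyph_map = {
--     "spiral": "fly",
--     "triangle_eye": "see",
--     "dot_cluster": "spirit",
--     "arc_wave": "flow",
--     "heart": "love",
--     "mandala": "balance",
--     "tear": "weep"
-- }
--
-- def apply_context(tokens):
--     # Run-length strategy: consume each maximal run of consecutive "spiral"
--     # tokens at once: a run of k spirals becomes (k-1) x "fly fast" + "fly";
--     # any other token is translated individually.
--     out = []
--     i = 0
--     n = len(tokens)
--     while i < n:
--         if tokens[i] == "spiral":
--             j = i
--             while j < n and tokens[j] == "spiral":
--                 j += 1
--             out.extend(["fly fast"] * (j - i - 1))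
--             out.append("fly")
--             i = j
--         else:
--             tok = tokens[i]
--             out.append(glyph_map.get(tok, f"[unknown:{tok}]"))
--             i += 1
--     return out
-- ===== Notes on version B (the rewrite author's own statement) =====
-- stated objective: alternative
-- what changed: Replaces A's per-token lookahead loop with a run-length algorithm: B scans for each maximal run of consecutive 'spiral' tokens and emits (k-1) copies of 'fly fast' plus one 'fly' for a run of length k, translating non-spiral tokens individually.
import Mathlib
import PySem

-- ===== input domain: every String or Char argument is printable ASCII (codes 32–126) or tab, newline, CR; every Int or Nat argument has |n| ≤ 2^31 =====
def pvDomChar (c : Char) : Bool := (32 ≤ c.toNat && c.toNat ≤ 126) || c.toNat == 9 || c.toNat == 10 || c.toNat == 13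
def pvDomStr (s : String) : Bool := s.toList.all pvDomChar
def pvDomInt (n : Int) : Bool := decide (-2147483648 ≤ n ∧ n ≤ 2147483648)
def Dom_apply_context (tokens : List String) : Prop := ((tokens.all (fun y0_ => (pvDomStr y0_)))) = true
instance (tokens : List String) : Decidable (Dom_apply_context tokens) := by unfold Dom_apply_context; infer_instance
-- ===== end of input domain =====

-- B replaces A's per-token lookahead loop by a run-length algorithm over maximal runs of
-- consecutive "spiral" tokens; objective: alternative algorithm, same cost.

-- ===== PORT A =====
-- module-level glyph_map dict
def glyph_map : PySem.Dict String String :=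
  PySem.Dict.ofList [("spiral", "fly"), ("triangle_eye", "see"), ("dot_cluster", "spirit"),
    ("arc_wave", "flow"), ("heart", "love"), ("mandala", "balance"), ("tear", "weep")]

-- port of A: one pass over enumerate(tokens), appending per element
def apply_context (tokens : List String) : List String :=
  (PySem.List.enumerate tokens).foldl
    (fun (result : List String) p =>
      if p.2 == "spiral" && decide (p.1 + 1 < (tokens.length : Int)) &&
          (PySem.List.pyGet? tokens (p.1 + 1) == some "spiral") then
        result ++ ["fly fast"]
      else
        result ++ [glyph_map.getD p.2 ("[unknown:" ++ p.2 ++ "]")])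
    []

-- ===== PORT B =====
-- port of B's outer while loop: recursion on the remaining suffix of tokens.
-- B's inner "while j < n and tokens[j] == 'spiral'" scan of the run is ported as
-- takeWhile/dropWhile on the suffix (the run length j-i and the resumption point j).
def altGo (l : List String) : List String :=
  match l with
  | [] => []
  | t :: ts =>
    if t == "spiral" then
      List.replicate (ts.takeWhile (· == "spiral")).length "fly fast" ++ ["fly"] ++
        altGo (ts.dropWhile (· == "spiral"))
    else
      (glyph_map.getD t ("[unknown:" ++ t ++ "]")) :: altGo ts
termination_by l.length
decreasing_by
  · simpa using Nat.lt_succ_of_le (List.length_dropWhile_le (· == "spiral") ts)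
  · simp

def apply_context_alt (tokens : List String) : List String := altGo tokens

-- ===== PRECONDITION & SPEC =====
def Spec_apply_context (tokens : List String) (out : List String) : Prop := out = apply_context_alt tokens
instance (tokens : List String) (out : List String) : Decidable (Spec_apply_context tokens out) := by unfold Spec_apply_context; infer_instance

-- ===== CLAIM (what is proved, stated in full; the proofs are below) =====
def Claim_equal_apply_context : Prop := ∀ (tokens : List String), Dom_apply_context tokens → Spec_apply_context tokens (apply_context tokens)

-- ===== LEMMAS AND PROOFS =====

-- translated word for a single token
def pvWord (tok : String) : String := glyph_map.getD tok ("[unknown:" ++ tok ++ "]")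

-- local (cons-shaped) characterisation of A's lookahead loop
def aLocal : List String → List String
  | [] => []
  | [t] => [pvWord t]
  | t :: u :: ts =>
    (if t == "spiral" && u == "spiral" then "fly fast" else pvWord t) :: aLocal (u :: ts)

-- whether position j (Nat) starts an adjacent spiral pair
def pvPair (tokens : List String) (j : Nat) : Bool :=
  (PySem.List.pyGet? tokens (j : Int) == some "spiral") &&
  (PySem.List.pyGet? tokens ((j : Int) + 1) == some "spiral")

theorem pv_foldl_app {α β : Type} (f : α → β) (l : List α) (acc : List β) :
    l.foldl (fun r x => r ++ [f x]) acc = acc ++ l.map f := by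
  induction l generalizing acc with
  | nil => simp
  | cons x xs ih => simp [List.foldl, ih, List.append_assoc]

theorem apply_context_eq_map (tokens : List String) :
    apply_context tokens = (PySem.List.enumerate tokens).map
      (fun p => if p.2 == "spiral" && decide (p.1 + 1 < (tokens.length : Int)) &&
          (PySem.List.pyGet? tokens (p.1 + 1) == some "spiral") then "fly fast" else pvWord p.2) := by
  unfold apply_context
  rw [show (fun (result : List String) (p : Int × String) =>
      if p.2 == "spiral" && decide (p.1 + 1 < (tokens.length : Int)) &&
          (PySem.List.pyGet? tokens (p.1 + 1) == some "spiral") then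
        result ++ ["fly fast"]
      else result ++ [glyph_map.getD p.2 ("[unknown:" ++ p.2 ++ "]")]) =
    (fun (result : List String) (p : Int × String) => result ++
      [if p.2 == "spiral" && decide (p.1 + 1 < (tokens.length : Int)) &&
          (PySem.List.pyGet? tokens (p.1 + 1) == some "spiral") then "fly fast" else pvWord p.2])
    from funext fun r => funext fun p => by unfold pvWord; split <;> rfl]
  rw [pv_foldl_app]
  rfl

theorem length_apply_context (tokens : List String) :
    (apply_context tokens).length = tokens.length := by
  rw [apply_context_eq_map]; simp [PySem.List.length_enumerate]

theorem getElem?_apply_context (tokens : List String) (j : Nat) (hj : j < tokens.length) :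
    (apply_context tokens)[j]? =
      some (if pvPair tokens j then "fly fast" else pvWord (tokens[j]'hj)) := by
  rw [apply_context_eq_map, List.getElem?_map, PySem.List.getElem?_enumerate,
      List.getElem?_eq_getElem hj]
  simp only [Option.map_some, Int.zero_add, pvPair]
  have hcast : ((j : Int) + 1) = ((j + 1 : Nat) : Int) := by push_cast; ring
  by_cases hlast : j + 1 < tokens.length
  · have h1 : ((j : Int) + 1 < (tokens.length : Int)) := by exact_mod_cast hlast
    simp only [hcast, PySem.List.pyGet?_natCast]
    simp [List.getElem?_eq_getElem hj, List.getElem?_eq_getElem hlast, h1]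
  · have h1 : ¬ ((j : Int) + 1 < (tokens.length : Int)) := by exact_mod_cast hlast
    have hnone : tokens[j + 1]? = none := by
      rw [List.getElem?_eq_none_iff]; omega
    simp only [hcast, PySem.List.pyGet?_natCast, hnone]
    simp [h1, List.getElem?_eq_getElem hj]

-- pvPair in terms of ordinary getElem?
theorem pvPair_eq (tokens : List String) (j : Nat) :
    pvPair tokens j = ((tokens[j]? == some "spiral") && (tokens[j+1]? == some "spiral")) := by
  have hcast : ((j : Int) + 1) = ((j + 1 : Nat) : Int) := by push_cast; ring
  simp only [pvPair, hcast, PySem.List.pyGet?_natCast]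

theorem length_aLocal (l : List String) : (aLocal l).length = l.length := by
  induction l with
  | nil => rfl
  | cons t ts ih =>
    cases ts with
    | nil => rfl
    | cons u us => simpa [aLocal] using ih

theorem getElem?_aLocal (l : List String) (j : Nat) (hj : j < l.length) :
    (aLocal l)[j]? = some (if pvPair l j then "fly fast" else pvWord (l[j]'hj)) := by
  induction l generalizing j with
  | nil => simp at hj
  | cons t ts ih =>
    cases ts with
    | nil =>
      have : j = 0 := by simpa using hj
      subst this
      simp [aLocal, pvPair_eq]
    | cons u us =>
      cases j with
      | zero => simp [aLocal, pvPair_eq]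
      | succ j =>
        have hj' : j < (u :: us).length := by simpa using hj
        have := ih j hj'
        simpa [aLocal, pvPair_eq] using this

-- A equals its local characterisation
theorem apply_context_eq_aLocal (tokens : List String) :
    apply_context tokens = aLocal tokens := by
  apply List.ext_getElem?
  intro j
  by_cases hj : j < tokens.length
  · rw [getElem?_apply_context tokens j hj, getElem?_aLocal tokens j hj]
  · rw [List.getElem?_eq_none_iff.mpr (by rw [length_apply_context]; omega),
        List.getElem?_eq_none_iff.mpr (by rw [length_aLocal]; omega)]

theorem pvWord_spiral : pvWord "spiral" = "fly" := by decide

-- expanding one maximal spiral run in aLocal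
theorem aLocal_spiral_run (ts : List String) :
    aLocal ("spiral" :: ts) =
      List.replicate (ts.takeWhile (· == "spiral")).length "fly fast" ++ ["fly"] ++
        aLocal (ts.dropWhile (· == "spiral")) := by
  induction ts with
  | nil => simp [aLocal, pvWord_spiral]
  | cons u us ih =>
    by_cases hu : u = "spiral"
    · subst hu
      simp only [aLocal, List.takeWhile, List.dropWhile]
      norm_num
      rw [ih]
      simp [List.replicate_succ]
    · have hu' : (u == "spiral") = false := by simpa using hu
      simp [aLocal, hu', pvWord_spiral, List.takeWhile, List.dropWhile]

-- B equals the local characterisation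
theorem altGo_eq_aLocal (l : List String) : altGo l = aLocal l := by
  induction l using altGo.induct with
  | case1 => simp [altGo, aLocal]
  | case2 t ts ht ih =>
    have ht' : t = "spiral" := by simpa using ht
    subst ht'
    rw [altGo, if_pos (by simp), ih, aLocal_spiral_run]
  | case3 t ts ht ih =>
    rw [altGo, if_neg ht]
    cases ts with
    | nil => simp [altGo, aLocal, pvWord]
    | cons u us => rw [ih]; simp [aLocal, pvWord, ht]

-- ===== VERDICT (by name: the statement is the Claim_ definition above) =====
theorem apply_context_spec : Claim_equal_apply_context := by
  intro tokens _
  unfold Spec_apply_context apply_context_alt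
  rw [apply_context_eq_aLocal, altGo_eq_aLocal]
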